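-- pv_equiv track=rewrite | github.com/calliope1/minecraft-inventory | inventory_search.py | drag_right
-- ===== SOURCE A (Python) =====
-- def empty_space(inv, full_inds=False):
--     if full_inds:
--         return [i for i, v in enumerate(inv) if not v]
--     return inv.count(0)
--
-- def drag_right(inv, act, n):
--     'Returns a new inventory and the size of the active slot after dragging right click accross n empty inventory slots.'
--     inv_out = inv.copy()
--     act_out = act
--     zero_inds = empty_space(inv_out, True)
--     delta = min(len(zero_inds), n, act_out)
--     for i in range(delta):
--         inv_out[zero_inds[i]] += 1
--         act_out -= 1
--     return inv_out, act_out
-- ===== SOURCE B (Python) =====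
-- def drag_right(inv, act, n):
--     'Returns a new inventory and the size of the active slot after dragging right click accross n empty inventory slots.'
--     cap = min(n, act)
--     out = []
--     filled = 0
--     for v in inv:
--         if not v and filled < cap:
--             out.append(v + 1)
--             filled += 1
--         else:
--             out.append(v)
--     return out, act - filled
-- ===== Notes on version B (the rewrite author's own statement) =====
-- stated objective: alternative
-- what changed: B replaces A's two-phase design (build the full list of empty-slot indices, then loop over the first delta of them updating in place) by one fused left-to-right pass that builds the output list directly, incrementing an empty slot while the filled counter is below min(n, act); no index list and no indexed writes.
import Mathlib
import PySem

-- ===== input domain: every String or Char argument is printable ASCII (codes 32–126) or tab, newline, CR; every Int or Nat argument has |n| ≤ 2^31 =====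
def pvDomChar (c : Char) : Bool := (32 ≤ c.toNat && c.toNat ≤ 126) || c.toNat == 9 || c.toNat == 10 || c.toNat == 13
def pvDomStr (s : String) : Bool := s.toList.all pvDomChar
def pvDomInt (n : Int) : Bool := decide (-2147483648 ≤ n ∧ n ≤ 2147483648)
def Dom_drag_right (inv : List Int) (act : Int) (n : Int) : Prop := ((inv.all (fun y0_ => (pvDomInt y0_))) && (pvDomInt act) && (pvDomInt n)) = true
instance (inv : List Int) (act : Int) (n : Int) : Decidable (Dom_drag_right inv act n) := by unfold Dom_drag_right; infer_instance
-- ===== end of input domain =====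

-- B fuses A's index-collection phase and fill loop into one left-to-right pass building the
-- output list directly (objective: alternative decomposition, same cost).

-- ===== PORT A =====
-- empty_space(inv, True) = [i for i, v in enumerate(inv) if not v]
def pvEmptySpaceInds (inv : List Int) : List Int :=
  (PySem.List.enumerate inv 0).filterMap (fun p => if p.2 = 0 then some p.1 else none)

-- inv_out[j] += 1  (j is always a valid non-negative index when used below)
def pvIncAt (l : List Int) (j : Int) : List Int :=
  PySem.List.pySetD l j (PySem.List.pyGetD l j 0 + 1)

def drag_right (inv : List Int) (act : Int) (n : Int) : List Int × Int :=
  let inv_out := inv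
  let act_out := act
  let zero_inds := pvEmptySpaceInds inv_out
  let delta := min (min ((zero_inds.length : Int)) n) act_out
  (PySem.List.pyRange 0 delta 1).foldl
    (fun (s : List Int × Int) i =>
      (pvIncAt s.1 (PySem.List.pyGetD zero_inds i 0), s.2 - 1))
    (inv_out, act_out)

-- ===== PORT B =====
def drag_right_alt (inv : List Int) (act : Int) (n : Int) : List Int × Int :=
  let cap := min n act
  let st := inv.foldl
    (fun (s : List Int × Int) v =>
      if v = 0 ∧ s.2 < cap then (s.1 ++ [v + 1], s.2 + 1) else (s.1 ++ [v], s.2))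
    ([], 0)
  (st.1, act - st.2)

-- ===== PRECONDITION & SPEC =====
def Spec_drag_right (inv : List Int) (act : Int) (n : Int) (out : List Int × Int) : Prop := out = drag_right_alt inv act n
instance (inv : List Int) (act : Int) (n : Int) (out : List Int × Int) : Decidable (Spec_drag_right inv act n out) := by unfold Spec_drag_right; infer_instance

-- ===== CLAIM (what is proved, stated in full; the proofs are below) =====
def Claim_equal_drag_right : Prop := ∀ (inv : List Int) (act : Int) (n : Int), Dom_drag_right inv act n → Spec_drag_right inv act n (drag_right inv act n)

-- ===== LEMMAS AND PROOFS =====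

-- indices (from start s) of the zero entries of a list
def zIdxFrom : List Int → Int → List Int
  | [], _ => []
  | v :: r, s => if v = 0 then s :: zIdxFrom r (s + 1) else zIdxFrom r (s + 1)

-- number of zero entries
def zCount : List Int → Nat
  | [] => 0
  | v :: r => if v = 0 then zCount r + 1 else zCount r

-- fill the first k zero entries with 1
def fillK : List Int → Nat → List Int
  | [], _ => []
  | v :: r, 0 => v :: r
  | v :: r, (k+1) => if v = 0 then (v + 1) :: fillK r k else v :: fillK r (k + 1)

-- B's recursion-with-cap normal form
def gFill : List Int → Int → List Int × Int
  | [], _ => ([], 0)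
  | v :: r, c =>
    if v = 0 ∧ 0 < c then
      let p := gFill r (c - 1); ((v + 1) :: p.1, p.2 + 1)
    else
      let p := gFill r c; (v :: p.1, p.2)

theorem fillK_zero (l : List Int) : fillK l 0 = l := by
  induction l with
  | nil => rfl
  | cons v r ih => simp [fillK]

theorem fillK_cons_ne (v : Int) (r : List Int) (k : Nat) (hv : v ≠ 0) :
    fillK (v :: r) k = v :: fillK r k := by
  cases k with
  | zero => simp [fillK, fillK_zero]
  | succ k => simp [fillK, hv]

theorem esi_gen (l : List Int) (s : Int) :
    (PySem.List.enumerate l s).filterMap (fun p => if p.2 = 0 then some p.1 else none)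
      = zIdxFrom l s := by
  induction l generalizing s with
  | nil => simp [PySem.List.enumerate_nil, zIdxFrom]
  | cons v r ih =>
    by_cases hv : v = 0 <;>
      simp [PySem.List.enumerate_cons, hv, zIdxFrom, ih]

theorem zIdxFrom_length (l : List Int) (s : Int) : (zIdxFrom l s).length = zCount l := by
  induction l generalizing s with
  | nil => rfl
  | cons v r ih => by_cases hv : v = 0 <;> simp [zIdxFrom, zCount, hv, ih]

-- A's indexed fill of the first k recorded zero indices = fillK, via a prefix accumulator
theorem foldl_incAt_take (l : List Int) (k : Nat) (pre : List Int) :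
    List.foldl pvIncAt (pre ++ l) ((zIdxFrom l (pre.length : Int)).take k)
      = pre ++ fillK l k := by
  induction l generalizing pre k with
  | nil => simp [zIdxFrom, fillK]
  | cons v r ih =>
    by_cases hv : v = 0
    · subst hv
      cases k with
      | zero => simp [zIdxFrom, fillK_zero]
      | succ k =>
        have hinc : pvIncAt (pre ++ (0:Int) :: r) (pre.length : Int)
            = (pre ++ [(0:Int) + 1]) ++ r := by
          have hg : PySem.List.pyGetD (pre ++ (0:Int) :: r) (pre.length : Int) 0 = 0 := by
            simp [PySem.List.pyGetD_natCast, List.getD_eq_getElem?_getD]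
          have hs : (pre ++ (0:Int) :: r).set pre.length ((0:Int) + 1)
              = pre ++ ((0:Int) + 1) :: r := by
            rw [List.set_append_right _ _ (Nat.le_refl _)]
            simp
          simp [pvIncAt, hg, PySem.List.pySetD_natCast, hs]
        have ih' := ih k (pre ++ [(0:Int) + 1])
        have hlen : ((pre ++ [(0:Int) + 1]).length : Int) = (pre.length : Int) + 1 := by simp
        rw [hlen] at ih'
        have hz : zIdxFrom ((0:Int) :: r) (pre.length : Int)
            = (pre.length : Int) :: zIdxFrom r ((pre.length : Int) + 1) := by
          simp [zIdxFrom]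
        rw [hz, List.take_succ_cons, List.foldl_cons, hinc, ih']
        simp [fillK]
    · have ih' := ih k (pre ++ [v])
      have hlen : ((pre ++ [v]).length : Int) = (pre.length : Int) + 1 := by simp
      rw [hlen] at ih'
      have hl : pre ++ v :: r = (pre ++ [v]) ++ r := by simp
      rw [hl]
      simp only [zIdxFrom, if_neg hv, ih']
      simp [fillK_cons_ne v r k hv]

-- strip the pair state of A's loop
theorem foldl_pair_split (zi : List Int) (idxs : List Int) (x : List Int) (a : Int) :
    idxs.foldl (fun (s : List Int × Int) i =>
        (pvIncAt s.1 (PySem.List.pyGetD zi i 0), s.2 - 1)) (x, a)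
      = (idxs.foldl (fun l i => pvIncAt l (PySem.List.pyGetD zi i 0)) x,
         a - (idxs.length : Int)) := by
  induction idxs generalizing x a with
  | nil => simp
  | cons i rest ih =>
    rw [List.foldl_cons, ih]
    simp only [Prod.mk.injEq, List.length_cons]
    exact ⟨rfl, by push_cast; ring⟩

-- fold over range-k indexing into zi = fold over (zi.take k)
theorem foldl_range_index (zi : List Int) (k : Nat) (hk : k ≤ zi.length) (x : List Int) :
    (List.range k).foldl (fun l (i : Nat) => pvIncAt l (PySem.List.pyGetD zi ((i : Int)) 0)) x
      = List.foldl pvIncAt x (zi.take k) := by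
  induction k generalizing x with
  | zero => simp
  | succ k ih =>
    have hk' : k ≤ zi.length := Nat.le_of_succ_le hk
    have hklt : k < zi.length := hk
    rw [List.range_succ, List.foldl_append, ih hk']
    have htake : zi.take (k + 1) = zi.take k ++ [zi[k]] := by
      rw [List.take_succ]
      simp [List.getElem?_eq_getElem hklt]
    rw [htake, List.foldl_append]
    simp [PySem.List.pyGetD_natCast, List.getD_eq_getElem?_getD, List.getElem?_eq_getElem hklt]

-- B's loop with output accumulator = gFill
theorem gFill_cons (v : Int) (r : List Int) (c : Int) :
    gFill (v :: r) c
      = if v = 0 ∧ 0 < c then ((v + 1) :: (gFill r (c - 1)).1, (gFill r (c - 1)).2 + 1)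
        else (v :: (gFill r c).1, (gFill r c).2) := rfl

theorem foldl_b_gFill (cap : Int) (l : List Int) (acc : List Int) (f : Int) :
    l.foldl (fun (s : List Int × Int) v =>
        if v = 0 ∧ s.2 < cap then (s.1 ++ [v + 1], s.2 + 1) else (s.1 ++ [v], s.2)) (acc, f)
      = (acc ++ (gFill l (cap - f)).1, f + (gFill l (cap - f)).2) := by
  induction l generalizing acc f with
  | nil => simp [gFill]
  | cons v r ih =>
    by_cases h : v = 0 ∧ f < cap
    · have h' : v = 0 ∧ 0 < cap - f := ⟨h.1, by omega⟩
      have hc : cap - (f + 1) = cap - f - 1 := by ring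
      rw [List.foldl_cons, if_pos h, ih, hc, gFill_cons, if_pos h']
      simp [List.append_assoc]
      omega
    · have h' : ¬ (v = 0 ∧ 0 < cap - f) := fun hc => h ⟨hc.1, by omega⟩
      rw [List.foldl_cons, if_neg h, ih, gFill_cons, if_neg h']
      simp [List.append_assoc]

-- gFill fills the first min(zCount, max cap 0) zeros
theorem gFill_eq (l : List Int) (c : Int) :
    gFill l c = (fillK l (min (zCount l) c.toNat), (min (zCount l) c.toNat : Int)) := by
  induction l generalizing c with
  | nil => simp [gFill, zCount, fillK]
  | cons v r ih =>
    by_cases hv : v = 0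
    · subst hv
      by_cases hc : 0 < c
      · have hm : min (zCount ((0:Int) :: r)) c.toNat = min (zCount r) (c - 1).toNat + 1 := by
          simp [zCount]
          omega
        have hz : zCount ((0:Int) :: r) = zCount r + 1 := by simp [zCount]
        rw [gFill_cons, if_pos ⟨rfl, hc⟩, ih, hm]
        simp [fillK]
        push_cast
        omega
      · have hc0 : c.toNat = 0 := Int.toNat_of_nonpos (by omega)
        have hm : min (zCount ((0:Int) :: r)) c.toNat = 0 := by simp [hc0]
        have hm' : min (zCount r) c.toNat = 0 := by simp [hc0]
        have hz : zCount ((0:Int) :: r) = zCount r + 1 := by simp [zCount]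
        rw [gFill_cons, if_neg (fun h => hc h.2), ih, hm, hm', fillK_zero, fillK_zero]
        simp
        omega
    · have hz : zCount (v :: r) = zCount r := by simp [zCount, hv]
      rw [gFill_cons, if_neg (fun h => hv h.1), ih, hz, fillK_cons_ne v r _ hv]

-- ===== VERDICT (by name: the statement is the Claim_ definition above) =====
theorem drag_right_spec : Claim_equal_drag_right := by
  intro inv act n _
  unfold Spec_drag_right drag_right drag_right_alt
  simp only []
  -- A side
  set zi := pvEmptySpaceInds inv with hzi
  have hziz : zi = zIdxFrom inv 0 := by
    rw [hzi]; unfold pvEmptySpaceInds; exact esi_gen inv 0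
  have hzlen : zi.length = zCount inv := by rw [hziz]; exact zIdxFrom_length inv 0
  set delta := min (min ((zi.length : Int)) n) act with hdelta
  have hd_le : delta ≤ (zi.length : Int) := by
    rw [hdelta]
    exact le_trans (min_le_left _ _) (min_le_left _ _)
  have hk : delta.toNat ≤ zi.length := by omega
  have hrange : PySem.List.pyRange 0 delta 1
      = (List.range delta.toNat).map (fun (k : Nat) => (k : Int)) := by
    by_cases hd : 0 ≤ delta
    · rw [show delta = ((delta.toNat : Int)) by omega]
      exact PySem.List.pyRange_zero_nat delta.toNat
    · rw [PySem.List.pyRange_one_eq_nil (by omega), show delta.toNat = 0 by omega]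
      simp
  rw [foldl_pair_split zi (PySem.List.pyRange 0 delta 1) inv act, hrange]
  rw [List.foldl_map, foldl_range_index zi delta.toNat hk inv]
  have htake0 : zi.take delta.toNat = (zIdxFrom inv 0).take delta.toNat := by rw [hziz]
  have hA1 : List.foldl pvIncAt inv (zi.take delta.toNat) = fillK inv delta.toNat := by
    rw [htake0]
    have := foldl_incAt_take inv delta.toNat ([] : List Int)
    simpa using this
  -- B side
  rw [foldl_b_gFill (min n act) inv [] 0]
  have hsub : min n act - 0 = min n act := by ring
  rw [hsub, gFill_eq inv (min n act)]
  -- counts agree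
  have hm : delta.toNat = min (zCount inv) (min n act).toNat := by
    rw [hdelta, hzlen]
    omega
  rw [hA1, hm]
  simp
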